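-- pv_equiv track=rewrite | github.com/chaeonee/Programmers | level2/더맵게.py | solution
-- ===== SOURCE A (Python) =====
-- import heapq
--
-- def solution(scoville, K):
--     heap = []
--     for s in scoville:
--         heapq.heappush(heap,s)
--
--     answer = 0
--     while heap[0] < K:
--         answer += 1
--         f1 = heapq.heappop(heap)
--         if not heap:
--             answer = -1
--             break
--         f2 = heapq.heappop(heap)
--
--         heapq.heappush(heap,f1+f2*2)
--
--     return answer
-- ===== SOURCE B (Python) =====
-- def solution(scoville, K):
--     lst = sorted(scoville)
--     answer = 0
--     while lst[0] < K:
--         answer += 1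
--         f1 = lst.pop(0)
--         if not lst:
--             return -1
--         f2 = lst.pop(0)
--         new = f1 + 2 * f2
--         i = 0
--         while i < len(lst) and lst[i] <= new:
--             i += 1
--         lst.insert(i, new)
--     return answer
-- ===== Notes on version B (the rewrite author's own statement) =====
-- stated objective: alternative
-- what changed: Replaces the binary heap with one upfront sort plus ordered scan-insertion into a sorted list: pop the two head elements each round and insert the mix at its sorted position.
import Mathlib
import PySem

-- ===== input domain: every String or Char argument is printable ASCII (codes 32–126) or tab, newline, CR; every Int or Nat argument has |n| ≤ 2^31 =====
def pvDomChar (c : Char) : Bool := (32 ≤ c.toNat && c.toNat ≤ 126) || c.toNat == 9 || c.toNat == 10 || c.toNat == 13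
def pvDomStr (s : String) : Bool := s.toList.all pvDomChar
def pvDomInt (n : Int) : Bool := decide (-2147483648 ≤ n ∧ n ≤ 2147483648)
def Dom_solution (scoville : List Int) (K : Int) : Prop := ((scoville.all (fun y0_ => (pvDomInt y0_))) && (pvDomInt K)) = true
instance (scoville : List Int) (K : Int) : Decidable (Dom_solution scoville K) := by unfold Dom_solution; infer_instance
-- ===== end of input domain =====

-- B replaces A's binary heap with one upfront sort and ordered scan-insertion into a
-- sorted list (objective: alternative data structure, not speed — B is quadratic);
-- equivalence is about return values (neither program mutates its argument).

-- ===== PORT A =====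
-- heapq is a library: its heappush/heappop are ported as a min-heap ADT (skew heap).
inductive SkewHeap : Type
  | nil : SkewHeap
  | node : Int → SkewHeap → SkewHeap → SkewHeap
deriving DecidableEq, Repr

def SkewHeap.size : SkewHeap → Nat
  | .nil => 0
  | .node _ l r => 1 + l.size + r.size

-- skew-heap merge, structurally recursive on a fuel that (provably) never runs out
def SkewHeap.mergeF : Nat → SkewHeap → SkewHeap → SkewHeap
  | _, .nil, h => h
  | _, h, .nil => h
  | 0, h, _ => h
  | fuel + 1, .node a l1 r1, .node b l2 r2 =>
    if a ≤ b then .node a (SkewHeap.mergeF fuel r1 (.node b l2 r2)) l1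
    else .node b (SkewHeap.mergeF fuel r2 (.node a l1 r1)) l2

def SkewHeap.merge (h1 h2 : SkewHeap) : SkewHeap :=
  SkewHeap.mergeF (h1.size + h2.size) h1 h2

-- heapq.heappush heap x
def SkewHeap.push (h : SkewHeap) (x : Int) : SkewHeap :=
  h.merge (.node x .nil .nil)

-- the 'while heap[0] < K' loop of A; each pass removes one element net, so
-- fuel = (initial size + 1) is enough; the nil case is unreachable under Pre_.
def loopA (K : Int) : Nat → SkewHeap → Int → Int
  | 0, _, ans => ans
  | _ + 1, .nil, ans => ans
  | fuel + 1, .node v l r, ans =>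
    if v < K then
      match SkewHeap.merge l r with
      | .nil => -1
      | .node v2 l2 r2 => loopA K fuel ((SkewHeap.merge l2 r2).push (v + v2 * 2)) (ans + 1)
    else ans

def solution (scoville : List Int) (K : Int) : Int :=
  let heap := scoville.foldl (fun h s => h.push s) SkewHeap.nil
  loopA K (scoville.length + 1) heap 0

-- ===== PORT B =====
-- B's inner while: scan to the first index with lst[i] > new, insert there.
def insertSorted (x : Int) : List Int → List Int
  | [] => [x]
  | y :: ys => if y ≤ x then y :: insertSorted x ys else x :: y :: ys

def loopB (K : Int) : Nat → List Int → Int → Int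
  | 0, _, ans => ans
  | _ + 1, [], ans => ans
  | fuel + 1, f1 :: rest, ans =>
    if f1 < K then
      match rest with
      | [] => -1
      | f2 :: rest2 => loopB K fuel (insertSorted (f1 + 2 * f2) rest2) (ans + 1)
    else ans

def solution_alt (scoville : List Int) (K : Int) : Int :=
  loopB K (scoville.length + 1) (PySem.List.sorted scoville (fun x => x) false) 0

-- ===== PRECONDITION & SPEC =====
-- Pre_ excludes only the empty list, on which A's 'heap[0]' raises IndexError.
def Pre_solution (scoville : List Int) (K : Int) : Prop := scoville ≠ []
instance (scoville : List Int) (K : Int) : Decidable (Pre_solution scoville K) := by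
  unfold Pre_solution; infer_instance

def pvWitness_solution : List Int × Int := ([1, 2, 3, 9, 10, 12], 7)

def Spec_solution (scoville : List Int) (K : Int) (out : Int) : Prop := out = solution_alt scoville K
instance (scoville : List Int) (K : Int) (out : Int) : Decidable (Spec_solution scoville K out) := by unfold Spec_solution; infer_instance

-- ===== CLAIM (what is proved, stated in full; the proofs are below) =====
def Claim_equal_solution : Prop := ∀ (scoville : List Int) (K : Int), Dom_solution scoville K → Pre_solution scoville K → Spec_solution scoville K (solution scoville K)

-- ===== LEMMAS AND PROOFS =====

def SkewHeap.toList : SkewHeap → List Int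
  | .nil => []
  | .node v l r => v :: (l.toList ++ r.toList)

-- heap order: every node's value is ≤ everything below it
def SkewHeap.HO : SkewHeap → Prop
  | .nil => True
  | .node v l r => (∀ x ∈ l.toList, v ≤ x) ∧ (∀ x ∈ r.toList, v ≤ x) ∧ l.HO ∧ r.HO

theorem skew_root_le {v : Int} {l r : SkewHeap}
    (h : SkewHeap.HO (.node v l r)) : ∀ x ∈ (SkewHeap.node v l r).toList, v ≤ x := by
  intro x hx
  simp [SkewHeap.toList] at hx
  rcases hx with rfl | hx | hx
  · exact le_refl _
  · exact h.1 x hx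
  · exact h.2.1 x hx

theorem skew_mergeF_mset : ∀ (fuel : Nat) (h1 h2 : SkewHeap), h1.size + h2.size ≤ fuel →
    ((SkewHeap.mergeF fuel h1 h2).toList : Multiset Int) = ↑h1.toList + ↑h2.toList := by
  intro fuel
  induction fuel with
  | zero =>
    intro h1 h2 hb
    cases h1 <;> cases h2 <;> simp [SkewHeap.size, SkewHeap.mergeF, SkewHeap.toList] at *
  | succ fuel ih =>
    intro h1 h2 hb
    cases h1 with
    | nil => simp [SkewHeap.mergeF, SkewHeap.toList]
    | node a l1 r1 =>
      cases h2 with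
      | nil => simp [SkewHeap.mergeF, SkewHeap.toList]
      | node b l2 r2 =>
        simp only [SkewHeap.size] at hb
        rw [SkewHeap.mergeF]
        split_ifs with hle
        · simp only [SkewHeap.toList, ← Multiset.coe_add, ← Multiset.cons_coe]
          rw [ih r1 (.node b l2 r2) (by simp [SkewHeap.size]; omega)]
          simp only [SkewHeap.toList, ← Multiset.coe_add, ← Multiset.cons_coe,
            ← Multiset.singleton_add]
          abel
        · simp only [SkewHeap.toList, ← Multiset.coe_add, ← Multiset.cons_coe]
          rw [ih r2 (.node a l1 r1) (by simp [SkewHeap.size]; omega)]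
          simp only [SkewHeap.toList, ← Multiset.coe_add, ← Multiset.cons_coe,
            ← Multiset.singleton_add]
          abel

theorem skew_merge_mset (h1 h2 : SkewHeap) :
    ((SkewHeap.merge h1 h2).toList : Multiset Int) = ↑h1.toList + ↑h2.toList :=
  skew_mergeF_mset _ h1 h2 (le_refl _)

theorem skew_mem_mergeF {x : Int} {fuel : Nat} {h1 h2 : SkewHeap}
    (hb : h1.size + h2.size ≤ fuel) :
    x ∈ (SkewHeap.mergeF fuel h1 h2).toList ↔ x ∈ h1.toList ∨ x ∈ h2.toList := by
  rw [← Multiset.mem_coe, skew_mergeF_mset fuel h1 h2 hb]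
  simp

theorem skew_mergeF_HO : ∀ (fuel : Nat) {h1 h2 : SkewHeap}, h1.size + h2.size ≤ fuel →
    h1.HO → h2.HO → (SkewHeap.mergeF fuel h1 h2).HO := by
  intro fuel
  induction fuel with
  | zero =>
    intro h1 h2 hb o1 o2
    cases h1 <;> cases h2 <;> simp [SkewHeap.size, SkewHeap.mergeF] at * <;> assumption
  | succ fuel ih =>
    intro h1 h2 hb o1 o2
    cases h1 with
    | nil => simpa [SkewHeap.mergeF]
    | node a l1 r1 =>
      cases h2 with
      | nil => simpa [SkewHeap.mergeF]
      | node b l2 r2 =>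
        simp only [SkewHeap.size] at hb
        rw [SkewHeap.mergeF]
        obtain ⟨hl1, hr1, ol1, or1⟩ := o1
        obtain ⟨hl2, hr2, ol2, or2⟩ := o2
        split_ifs with hle
        · refine ⟨?_, hl1, ih (by simp [SkewHeap.size]; omega) or1 ⟨hl2, hr2, ol2, or2⟩, ol1⟩
          intro x hx
          rcases (skew_mem_mergeF (by simp [SkewHeap.size]; omega)).mp hx with hx | hx
          · exact hr1 x hx
          · exact le_trans hle (skew_root_le ⟨hl2, hr2, ol2, or2⟩ x hx)
        · refine ⟨?_, hl2, ih (by simp [SkewHeap.size]; omega) or2 ⟨hl1, hr1, ol1, or1⟩, ol2⟩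
          intro x hx
          rcases (skew_mem_mergeF (by simp [SkewHeap.size]; omega)).mp hx with hx | hx
          · exact hr2 x hx
          · exact le_trans (by omega) (skew_root_le ⟨hl1, hr1, ol1, or1⟩ x hx)

theorem skew_merge_HO {h1 h2 : SkewHeap} (o1 : h1.HO) (o2 : h2.HO) :
    (SkewHeap.merge h1 h2).HO :=
  skew_mergeF_HO _ (le_refl _) o1 o2

theorem insertSorted_mset (x : Int) (ys : List Int) :
    ((insertSorted x ys : List Int) : Multiset Int) = x ::ₘ ↑ys := by
  induction ys with
  | nil => simp [insertSorted]
  | cons y ys ih =>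
    simp only [insertSorted]
    split_ifs with h
    · simp only [← Multiset.cons_coe, ih, Multiset.cons_swap]
    · simp [← Multiset.cons_coe]

theorem insertSorted_pairwise {x : Int} {ys : List Int}
    (h : ys.Pairwise (· ≤ ·)) : (insertSorted x ys).Pairwise (· ≤ ·) := by
  induction ys with
  | nil => simp [insertSorted]
  | cons y ys ih =>
    rcases List.pairwise_cons.mp h with ⟨hy, hys⟩
    simp only [insertSorted]
    split_ifs with hyx
    · refine List.pairwise_cons.mpr ⟨?_, ih hys⟩
      intro z hz
      rw [← Multiset.mem_coe, insertSorted_mset] at hz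
      simp at hz
      rcases hz with rfl | hz
      · exact hyx
      · exact hy z hz
    · refine List.pairwise_cons.mpr ⟨?_, h⟩
      intro z hz
      simp at hz
      rcases hz with rfl | hz
      · omega
      · have := hy z hz; omega

theorem foldl_push_mset (xs : List Int) : ∀ (h : SkewHeap),
    ((xs.foldl (fun h s => h.push s) h).toList : Multiset Int) = ↑h.toList + ↑xs := by
  induction xs with
  | nil => simp
  | cons x xs ih =>
    intro h
    rw [List.foldl_cons, ih]
    simp only [SkewHeap.push, skew_merge_mset, SkewHeap.toList, List.append_nil,
      ← Multiset.cons_coe, ← Multiset.singleton_add]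
    abel

theorem foldl_push_HO (xs : List Int) : ∀ (h : SkewHeap), h.HO →
    (xs.foldl (fun h s => h.push s) h).HO := by
  induction xs with
  | nil => exact fun h o => o
  | cons x xs ih =>
    intro h o
    exact ih _ (skew_merge_HO o (by simp [SkewHeap.HO, SkewHeap.toList]))

theorem loop_eq (K : Int) : ∀ (fuel : Nat) (h : SkewHeap) (lst : List Int) (ans : Int),
    h.HO → (h.toList : Multiset Int) = ↑lst → lst.Pairwise (· ≤ ·) →
    loopA K fuel h ans = loopB K fuel lst ans := by
  intro fuel
  induction fuel with
  | zero => intros; rfl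
  | succ fuel ih =>
    intro h lst ans ho hm hs
    cases h with
    | nil =>
        have : lst = [] := by simpa [SkewHeap.toList, Multiset.coe_eq_zero] using hm.symm
        subst this; rfl
    | node v l r =>
      cases lst with
      | nil => exfalso; simp [SkewHeap.toList, Multiset.coe_eq_zero] at hm
      | cons f1 rest =>
        have hv1 : v = f1 := by
          have hvm : v ∈ f1 :: rest := by
            rw [← Multiset.mem_coe, ← hm]; simp [SkewHeap.toList]
          have hfm : f1 ∈ (SkewHeap.node v l r).toList := by
            rw [← Multiset.mem_coe, hm]; simp
          have h1 : v ≤ f1 := skew_root_le ho f1 hfm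
          rcases List.mem_cons.mp hvm with h2 | h2
          · exact h2
          · have := (List.pairwise_cons.mp hs).1 v h2; omega
        subst hv1
        have hm1 : ((SkewHeap.merge l r).toList : Multiset Int) = ↑rest := by
          rw [skew_merge_mset]
          have : ((SkewHeap.node v l r).toList : Multiset Int) = v ::ₘ (↑l.toList + ↑r.toList) := by
            simp [SkewHeap.toList, ← Multiset.cons_coe, ← Multiset.coe_add]
          rw [this, ← Multiset.cons_coe] at hm
          exact (Multiset.cons_inj_right v).mp hm
        simp only [loopA, loopB]
        by_cases hK : v < K
        · simp only [if_pos hK]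
          cases hmr : SkewHeap.merge l r with
          | nil =>
              have : rest = [] := by
                rw [hmr] at hm1
                simpa [SkewHeap.toList, Multiset.coe_eq_zero] using hm1.symm
              subst this; rfl
          | node v2 l2 r2 =>
              rw [hmr] at hm1
              have ho1 : (SkewHeap.node v2 l2 r2).HO := hmr ▸ skew_merge_HO ho.2.2.1 ho.2.2.2
              cases rest with
              | nil => exfalso; simp [SkewHeap.toList, Multiset.coe_eq_zero] at hm1
              | cons f2 rest2 =>
                have hs2 : (f2 :: rest2).Pairwise (· ≤ · : Int → Int → Prop) :=
                  (List.pairwise_cons.mp hs).2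
                have hv2 : v2 = f2 := by
                  have hvm : v2 ∈ f2 :: rest2 := by
                    rw [← Multiset.mem_coe, ← hm1]; simp [SkewHeap.toList]
                  have hfm : f2 ∈ (SkewHeap.node v2 l2 r2).toList := by
                    rw [← Multiset.mem_coe, hm1]; simp
                  have h1 : v2 ≤ f2 := skew_root_le ho1 f2 hfm
                  rcases List.mem_cons.mp hvm with h2 | h2
                  · exact h2
                  · have := (List.pairwise_cons.mp hs2).1 v2 h2; omega
                subst hv2
                have hm2 : ((SkewHeap.merge l2 r2).toList : Multiset Int) = ↑rest2 := by
                  rw [skew_merge_mset]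
                  have : ((SkewHeap.node v2 l2 r2).toList : Multiset Int)
                      = v2 ::ₘ (↑l2.toList + ↑r2.toList) := by
                    simp [SkewHeap.toList, ← Multiset.cons_coe, ← Multiset.coe_add]
                  rw [this, ← Multiset.cons_coe] at hm1
                  exact (Multiset.cons_inj_right v2).mp hm1
                apply ih
                · exact skew_merge_HO (skew_merge_HO ho1.2.2.1 ho1.2.2.2)
                    (by simp [SkewHeap.HO, SkewHeap.toList])
                · rw [SkewHeap.push, skew_merge_mset, hm2, insertSorted_mset]
                  have : v + v2 * 2 = v + 2 * v2 := by ring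
                  simp [SkewHeap.toList, this, ← Multiset.singleton_add]
                  abel
                · exact insertSorted_pairwise (List.pairwise_cons.mp hs2).2
        · simp only [if_neg hK]

-- ===== VERDICT (by name: the statement is the Claim_ definition above) =====
theorem solution_spec : Claim_equal_solution := by
  intro scoville K _ _
  unfold Spec_solution solution solution_alt
  apply loop_eq
  · exact foldl_push_HO scoville .nil trivial
  · rw [foldl_push_mset]
    simp [SkewHeap.toList]
    exact (PySem.List.sorted_perm scoville (fun x => x) false).symm
  · exact PySem.List.sorted_pairwise scoville (fun x => x)
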